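-- pv_equiv track=rewrite | github.com/taylorott/Advent_of_Code | src/Year_2019/Day16/Solution.py | compute_element
-- ===== SOURCE A (Python) =====
-- def compute_element(input_list,n):
--     n+=1
--     base_pattern = [0]*n + [1]*n + [0]*n + [-1]*n
--
--     total = 0
--     for i in range(len(input_list)):
--         j = (i+1)%len(base_pattern)
--         total+=input_list[i]*base_pattern[j]
--
--     total = int(abs(total))%10
--
--     return total
-- ===== SOURCE B (Python) =====
-- def compute_element(input_list, n):
--     # Block-sum formulation: the pattern (after the n+=1 shift) is, starting at
--     # index m-1, repeating blocks [ +1 x m | 0 x m | -1 x m | 0 x m ].  So walk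
--     # the tail in strides of 2*m, alternating the sign of each m-block sum, and
--     # never touch the zero blocks.
--     m = n + 1
--     tail = input_list[m - 1:]
--     total = 0
--     sign = 1
--     while tail:
--         total += sign * sum(tail[:m])
--         sign = -sign
--         tail = tail[2 * m:]
--     return abs(total) % 10
-- ===== Notes on version B (the rewrite author's own statement) =====
-- stated objective: faster
-- what changed: Instead of materialising the 4*(n+1)-long base pattern and multiplying every element by its pattern coefficient, B drops the leading zero prefix and walks the tail in strides of 2*(n+1), adding and subtracting whole m-element block sums and never touching the zero blocks.
import Mathlib
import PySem

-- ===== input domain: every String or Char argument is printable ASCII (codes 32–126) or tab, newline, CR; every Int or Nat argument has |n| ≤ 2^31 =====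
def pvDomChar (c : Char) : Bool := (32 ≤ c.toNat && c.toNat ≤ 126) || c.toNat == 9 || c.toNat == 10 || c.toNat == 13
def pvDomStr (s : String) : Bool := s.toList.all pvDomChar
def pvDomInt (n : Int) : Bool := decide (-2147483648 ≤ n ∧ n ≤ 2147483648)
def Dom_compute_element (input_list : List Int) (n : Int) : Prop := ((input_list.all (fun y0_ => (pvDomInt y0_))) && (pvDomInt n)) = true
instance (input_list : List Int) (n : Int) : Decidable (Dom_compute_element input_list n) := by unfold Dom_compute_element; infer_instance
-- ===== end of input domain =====

-- B replaces the per-element pattern dot product by alternating-sign block sums over the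
-- tail, skipping the zero blocks and the per-element multiply (measured faster, constant factor).

-- ===== PORT A =====
-- literal transliteration of Source A: build base_pattern, dot-product with pattern index (i+1) mod len
def compute_element (input_list : List Int) (n : Int) : Int :=
  let m := n + 1
  let base_pattern : List Int :=
    List.replicate m.toNat 0 ++ List.replicate m.toNat 1 ++
    List.replicate m.toNat 0 ++ List.replicate m.toNat (-1)
  let total := (List.range input_list.length).foldl
    (fun total i => total + input_list.getD i 0 * base_pattern.getD ((i + 1) % base_pattern.length) 0) 0
  ((total.natAbs : Int) % 10)

-- ===== PORT B =====
-- Source B's while loop: sum a block of m, flip the sign, drop 2*m.  Exact for m ≥ 1 (Pre_):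
-- '(a :: rest).drop (2*m)' is written 'rest.drop (2*m - 1)' so the recursion is on a shorter list.
def altLoop (m : Nat) (sign : Int) : List Int → Int
  | [] => 0
  | a :: rest =>
      sign * ((a :: rest).take m).sum + altLoop m (-sign) (rest.drop (2 * m - 1))
termination_by l => l.length
decreasing_by simp

def compute_element_alt (input_list : List Int) (n : Int) : Int :=
  let m := n + 1
  let tail := PySem.List.slice input_list (some (m - 1)) none
  let total := altLoop m.toNat 1 tail
  ((total.natAbs : Int) % 10)

-- ===== PRECONDITION & SPEC =====
-- Pre_ excludes negative n with a nonempty list: there base_pattern is empty and the Python A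
-- raises ZeroDivisionError at '(i+1)%len(base_pattern)'.
def Pre_compute_element (input_list : List Int) (n : Int) : Prop := 0 ≤ n ∨ input_list = []
instance (input_list : List Int) (n : Int) : Decidable (Pre_compute_element input_list n) := by
  unfold Pre_compute_element; infer_instance
def pvWitness_compute_element : List Int × Int := ([1, 2, 3, 4, 5, 6, 7, 8], 1)

def Spec_compute_element (input_list : List Int) (n : Int) (out : Int) : Prop := out = compute_element_alt input_list n
instance (input_list : List Int) (n : Int) (out : Int) : Decidable (Spec_compute_element input_list n out) := by unfold Spec_compute_element; infer_instance

-- ===== CLAIM (what is proved, stated in full; the proofs are below) =====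
def Claim_equal_compute_element : Prop := ∀ (input_list : List Int) (n : Int), Dom_compute_element input_list n → Pre_compute_element input_list n → Spec_compute_element input_list n (compute_element input_list n)

-- ===== LEMMAS AND PROOFS =====

/-- `specSum y d = Σ_j y_j * d j`, the common reference value of both ports. -/
def specSum : List Int → (Nat → Int) → Int
  | [], _ => 0
  | a :: t, d => a * d 0 + specSum t (fun j => d (j + 1))

/-- The repeating coefficient stream seen from index m-1 on: m ones, m zeros, m minus-ones, m zeros. -/
def dStream (m : Nat) (j : Nat) : Int :=
  if (j / m) % 4 = 0 then 1 else if (j / m) % 4 = 2 then -1 else 0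

lemma altLoop_nil (m : Nat) (s : Int) : altLoop m s [] = 0 := by rw [altLoop]

lemma altLoop_cons (m : Nat) (s : Int) (a : Int) (rest : List Int) :
    altLoop m s (a :: rest) =
      s * ((a :: rest).take m).sum + altLoop m (-s) (rest.drop (2 * m - 1)) := by
  rw [altLoop]

lemma specSum_congr (y : List Int) (d e : Nat → Int) (h : ∀ j, j < y.length → d j = e j) :
    specSum y d = specSum y e := by
  induction y generalizing d e with
  | nil => rfl
  | cons a t ih =>
      simp only [specSum, h 0 (by simp)]
      rw [ih _ _ (fun j hj => h (j + 1) (by simpa using Nat.succ_lt_succ hj))]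

lemma specSum_append (u v : List Int) (d : Nat → Int) :
    specSum (u ++ v) d = specSum u d + specSum v (fun j => d (j + u.length)) := by
  induction u generalizing d with
  | nil => simp [specSum]
  | cons a t ih =>
      simp only [List.cons_append, specSum, ih, List.length_cons]
      rw [specSum_congr v (fun j => d (j + t.length + 1)) (fun j => d (j + (t.length + 1)))
        (fun j _ => by congr 1)]
      ring

lemma specSum_split (y : List Int) (k : Nat) (d : Nat → Int) :
    specSum y d = specSum (y.take k) d + specSum (y.drop k) (fun j => d (j + (y.take k).length)) := by
  conv_lhs => rw [← List.take_append_drop k y]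
  exact specSum_append _ _ d

lemma specSum_ones (y : List Int) (d : Nat → Int) (h : ∀ j, j < y.length → d j = 1) :
    specSum y d = y.sum := by
  induction y generalizing d with
  | nil => rfl
  | cons a t ih =>
      simp only [specSum, h 0 (by simp), mul_one, List.sum_cons]
      rw [ih _ (fun j hj => h (j + 1) (by simpa using Nat.succ_lt_succ hj))]

lemma specSum_zeros (y : List Int) (d : Nat → Int) (h : ∀ j, j < y.length → d j = 0) :
    specSum y d = 0 := by
  induction y generalizing d with
  | nil => rfl
  | cons a t ih =>
      simp only [specSum, h 0 (by simp), mul_zero, zero_add]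
      exact ih _ (fun j hj => h (j + 1) (by simpa using Nat.succ_lt_succ hj))

lemma specSum_neg (y : List Int) (d : Nat → Int) :
    specSum y (fun j => -(d j)) = -specSum y d := by
  induction y generalizing d with
  | nil => simp [specSum]
  | cons a t ih => simp only [specSum, ih]; ring

lemma dStream_lt (m j : Nat) (hj : j < m) : dStream m j = 1 := by
  simp [dStream, Nat.div_eq_of_lt hj]

lemma dStream_mid (m j : Nat) (hm : 1 ≤ m) (hj : j < m) : dStream m (j + m) = 0 := by
  have h1 : (j + m) / m = 1 := by
    rw [Nat.add_div_right _ (by omega), Nat.div_eq_of_lt hj]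
  simp [dStream, h1]

lemma dStream_shift (m j : Nat) (hm : 1 ≤ m) : dStream m (j + 2 * m) = -(dStream m j) := by
  have h1 : (j + 2 * m) / m = j / m + 2 := by
    rw [show j + 2 * m = j + m * 2 by ring, Nat.add_mul_div_left _ _ (by omega)]
  simp only [dStream, h1]
  have h4 := Nat.mod_lt (j / m) (show 0 < 4 by norm_num)
  have h4' : (j / m + 2) % 4 = (j / m % 4 + 2) % 4 := by omega
  interval_cases h : (j / m) % 4 <;> simp_all

-- the A-side fold is a specSum
lemma foldl_range_spec (x : List Int) (f : Nat → Int) (t : Int) :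
    (List.range x.length).foldl (fun tot i => tot + x.getD i 0 * f i) t = t + specSum x f := by
  induction x generalizing f t with
  | nil => simp [specSum]
  | cons a xs ih =>
      rw [List.length_cons, List.range_succ_eq_map, List.foldl_cons, List.foldl_map]
      simp only [List.getD_cons_succ, List.getD_cons_zero, specSum]
      rw [← add_assoc]
      exact ih (fun i => f (i + 1)) (t + a * f 0)

-- sign linearity of the B loop
lemma altLoop_sign (y : List Int) (m : Nat) (s : Int) : altLoop m s y = s * altLoop m 1 y := by
  have H : ∀ (N : Nat) (y : List Int), y.length ≤ N → ∀ s : Int, altLoop m s y = s * altLoop m 1 y := by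
    intro N
    induction N with
    | zero =>
        intro y hy s
        have : y = [] := by cases y <;> simp_all
        simp [this, altLoop_nil]
    | succ N ih =>
        intro y hy s
        cases y with
        | nil => simp [altLoop_nil]
        | cons a rest =>
            rw [altLoop_cons, altLoop_cons]
            have hz : (rest.drop (2 * m - 1)).length ≤ N := by
              simp at hy ⊢; omega
            rw [ih _ hz (-s), ih _ hz (-1)]
            ring
  exact H y.length y le_rfl s

lemma specSum_take2m (m : Nat) (hm : 1 ≤ m) (y : List Int) :
    specSum (y.take (2 * m)) (dStream m) = (y.take m).sum := by
  rw [specSum_split (y.take (2 * m)) m]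
  rw [List.take_take, show min m (2 * m) = m by omega]
  have h1 : specSum (y.take m) (dStream m) = (y.take m).sum := by
    apply specSum_ones
    intro j hj
    exact dStream_lt m j (by simp at hj; omega)
  rw [h1]
  have h2 : specSum ((y.take (2 * m)).drop m) (fun j => dStream m (j + (y.take m).length)) = 0 := by
    apply specSum_zeros
    intro j hj
    simp only [List.length_drop, List.length_take] at hj
    have hlen : m ≤ y.length := by omega
    rw [List.length_take, show min m y.length = m by omega]
    exact dStream_mid m j hm (by omega)
  rw [h2, add_zero]

-- the recurrence the B loop satisfies, at the level of specSum
lemma specSum_rec (m : Nat) (hm : 1 ≤ m) (y : List Int) :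
    specSum y (dStream m) = (y.take m).sum - specSum (y.drop (2 * m)) (dStream m) := by
  rw [specSum_split y (2 * m), specSum_take2m m hm y]
  by_cases hlen : 2 * m ≤ y.length
  · rw [List.length_take, show min (2 * m) y.length = 2 * m by omega]
    have : specSum (y.drop (2 * m)) (fun j => dStream m (j + 2 * m)) =
        specSum (y.drop (2 * m)) (fun j => -(dStream m j)) := by
      apply specSum_congr
      intro j _
      exact dStream_shift m j hm
    rw [this, specSum_neg]
    ring
  · rw [List.drop_eq_nil_of_le (by omega)]
    simp [specSum]

lemma altLoop_eq_specSum (m : Nat) (hm : 1 ≤ m) (y : List Int) :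
    altLoop m 1 y = specSum y (dStream m) := by
  have H : ∀ (N : Nat) (y : List Int), y.length ≤ N → altLoop m 1 y = specSum y (dStream m) := by
    intro N
    induction N with
    | zero =>
        intro y hy
        have : y = [] := by cases y <;> simp_all
        simp [this, altLoop_nil, specSum]
    | succ N ih =>
        intro y hy
        cases y with
        | nil => simp [altLoop_nil, specSum]
        | cons a rest =>
            rw [altLoop_cons, altLoop_sign, specSum_rec m hm (a :: rest)]
            have hdrop : rest.drop (2 * m - 1) = (a :: rest).drop (2 * m) := by
              obtain ⟨k, hk⟩ : ∃ k, 2 * m = k + 1 := ⟨2 * m - 1, by omega⟩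
              rw [hk, List.drop_succ_cons]
              congr 1
            have hz : (rest.drop (2 * m - 1)).length ≤ N := by
              simp at hy ⊢; omega
            rw [ih _ hz, hdrop]
            ring
  exact H y.length y le_rfl

-- characterisation of the base pattern by index
lemma bp_getD (m k : Nat) (hk : k < 4 * m) :
    (List.replicate m (0 : Int) ++ List.replicate m 1 ++ List.replicate m 0 ++
      List.replicate m (-1)).getD k 0 =
    if k < m then 0 else if k < 2 * m then 1 else if k < 3 * m then 0 else -1 := by
  simp only [List.getD_eq_getElem?_getD, List.append_assoc, List.getElem?_append,
    List.length_replicate, List.getElem?_replicate]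
  split_ifs <;> simp_all <;> omega

-- the A coefficient at position j + (m-1) is dStream m j
lemma bp_coeff (m j : Nat) (hm : 1 ≤ m) :
    (List.replicate m (0 : Int) ++ List.replicate m 1 ++ List.replicate m 0 ++
      List.replicate m (-1)).getD ((j + m) % (4 * m)) 0 = dStream m j := by
  set t := j / m with ht
  set s := j % m with hs
  have hsm : s < m := Nat.mod_lt _ (by omega)
  have hj : j = m * t + s := by rw [ht, hs]; exact (Nat.div_add_mod j m).symm
  have hmod : (j + m) % (4 * m) = m * ((t + 1) % 4) + s := by
    have e1 : j + m = 4 * m * ((t + 1) / 4) + (m * ((t + 1) % 4) + s) := by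
      have := Nat.div_add_mod (t + 1) 4
      calc j + m = m * (t + 1) + s := by rw [hj]; ring
        _ = m * (4 * ((t + 1) / 4) + (t + 1) % 4) + s := by rw [this]
        _ = 4 * m * ((t + 1) / 4) + (m * ((t + 1) % 4) + s) := by ring
    rw [e1, Nat.mul_add_mod]
    exact Nat.mod_eq_of_lt (by have := Nat.mod_lt (t + 1) (show 0 < 4 by norm_num); nlinarith)
  rw [hmod, bp_getD _ _ (by nlinarith [Nat.mod_lt (t + 1) (show 0 < 4 by norm_num)])]
  have h4 : (t + 1) % 4 = 0 ∧ t % 4 = 3 ∨ (t + 1) % 4 = 1 ∧ t % 4 = 0 ∨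
      (t + 1) % 4 = 2 ∧ t % 4 = 1 ∨ (t + 1) % 4 = 3 ∧ t % 4 = 2 := by omega
  simp only [dStream, ← ht]
  rcases h4 with ⟨h1, h2⟩ | ⟨h1, h2⟩ | ⟨h1, h2⟩ | ⟨h1, h2⟩ <;> rw [h1, h2] <;>
    split_ifs <;> first | rfl | omega | exact (by assumption : False).elim

-- leading m-1 coefficients of A vanish, and from m-1 on they are dStream
lemma specSum_A (m : Nat) (hm : 1 ≤ m) (x : List Int) :
    specSum x (fun j =>
      (List.replicate m (0 : Int) ++ List.replicate m 1 ++ List.replicate m 0 ++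
        List.replicate m (-1)).getD ((j + 1) % (4 * m)) 0) =
    specSum (x.drop (m - 1)) (dStream m) := by
  rw [specSum_split x (m - 1)]
  have h1 : specSum (x.take (m - 1)) (fun j =>
      (List.replicate m (0 : Int) ++ List.replicate m 1 ++ List.replicate m 0 ++
        List.replicate m (-1)).getD ((j + 1) % (4 * m)) 0) = 0 := by
    apply specSum_zeros
    intro j hj
    simp only [List.length_take] at hj
    have hjm : j + 1 < m := by omega
    rw [Nat.mod_eq_of_lt (by omega), bp_getD m _ (by omega)]
    simp [hjm]
  rw [h1, zero_add]
  by_cases hlen : m - 1 ≤ x.length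
  · apply specSum_congr
    intro j _
    rw [List.length_take, show min (m - 1) x.length = m - 1 by omega]
    have : j + (m - 1) + 1 = j + m := by omega
    rw [this, bp_coeff m j hm]
  · rw [List.drop_eq_nil_of_le (by omega)]
    apply specSum_zeros
    simp

lemma totals_eq (x : List Int) (n : Int) (hn : 0 ≤ n) :
    (List.range x.length).foldl
      (fun total i => total + x.getD i 0 *
        (List.replicate (n + 1).toNat (0 : Int) ++ List.replicate (n + 1).toNat 1 ++
          List.replicate (n + 1).toNat 0 ++ List.replicate (n + 1).toNat (-1)).getD
          ((i + 1) %
            (List.replicate (n + 1).toNat (0 : Int) ++ List.replicate (n + 1).toNat 1 ++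
              List.replicate (n + 1).toNat 0 ++ List.replicate (n + 1).toNat (-1)).length) 0) 0 =
    altLoop (n + 1).toNat 1 (x.drop ((n + 1).toNat - 1)) := by
  set m := (n + 1).toNat with hmdef
  have hm : 1 ≤ m := by omega
  have hlen : (List.replicate m (0 : Int) ++ List.replicate m 1 ++ List.replicate m 0 ++
      List.replicate m (-1)).length = 4 * m := by
    simp; ring
  rw [hlen, foldl_range_spec, zero_add, specSum_A m hm x, altLoop_eq_specSum m hm]

-- ===== VERDICT (by name: the statement is the Claim_ definition above) =====
theorem compute_element_spec : Claim_equal_compute_element := by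
  intro input_list n _ hpre
  unfold Spec_compute_element compute_element compute_element_alt
  rcases hpre with hn | hnil
  · have hslice : PySem.List.slice input_list (some (n + 1 - 1)) none =
        input_list.drop ((n + 1).toNat - 1) := by
      rw [PySem.List.slice_from _ (by omega : (0 : Int) ≤ n + 1 - 1)]
      congr 1
      omega
    simp only [hslice]
    rw [totals_eq input_list n hn]
  · subst hnil
    simp [altLoop_nil, PySem.List.slice_some_none]
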